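-- pv_equiv track=rewrite | github.com/velocirobbie/make-graphitics | scripts/molecules/graphene_cell.py | assign_atom_charges
-- ===== SOURCE A (Python) =====
-- def assign_atom_charges(lattice_dimensions,q):
--     atom_charges = []
--     cell_charges = [0,0,0,0]
--     for x in range(lattice_dimensions[0]):
--          for y in range(lattice_dimensions[1]):
--              for z in range(lattice_dimensions[2]):
--                 atom_charges.extend(list(cell_charges))
--     return atom_charges
-- ===== SOURCE B (Python) =====
-- def assign_atom_charges(lattice_dimensions, q):
--     n = 1
--     for d in lattice_dimensions[:3]:
--         n *= max(0, d)
--     return [0 for _ in range(4 * n)]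
-- ===== Notes on version B (the rewrite author's own statement) =====
-- stated objective: simpler
-- what changed: Replaces the triple nested extend-loop by a closed form: multiply the (zero-clamped) first three dimensions once and emit the 4*n zeros directly.
import Mathlib
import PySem

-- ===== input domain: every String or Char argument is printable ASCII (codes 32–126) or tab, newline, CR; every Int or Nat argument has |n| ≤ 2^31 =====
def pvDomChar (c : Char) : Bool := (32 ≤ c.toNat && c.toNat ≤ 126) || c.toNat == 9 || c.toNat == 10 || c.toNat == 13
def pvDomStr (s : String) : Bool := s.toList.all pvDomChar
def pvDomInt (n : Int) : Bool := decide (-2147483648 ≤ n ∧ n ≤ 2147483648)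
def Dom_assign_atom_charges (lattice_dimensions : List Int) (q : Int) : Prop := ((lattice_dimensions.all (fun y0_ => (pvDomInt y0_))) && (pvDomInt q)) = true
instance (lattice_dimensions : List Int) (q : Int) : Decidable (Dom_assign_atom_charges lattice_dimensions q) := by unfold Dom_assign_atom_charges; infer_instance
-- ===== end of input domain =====

-- B replaces A's triple nested extend-loop by one clamped product and a single list repetition (simpler).

-- ===== PORT A =====
def assign_atom_charges (lattice_dimensions : List Int) (q : Int) : List Int :=
  let atom_charges : List Int := []
  let cell_charges : List Int := [0, 0, 0, 0]
  (PySem.List.pyRange 0 (PySem.List.pyGetD lattice_dimensions 0 0) 1).foldl (fun acc _x =>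
    (PySem.List.pyRange 0 (PySem.List.pyGetD lattice_dimensions 1 0) 1).foldl (fun acc2 _y =>
      (PySem.List.pyRange 0 (PySem.List.pyGetD lattice_dimensions 2 0) 1).foldl (fun acc3 _z =>
        acc3 ++ cell_charges) acc2) acc) atom_charges

-- ===== PORT B =====
def assign_atom_charges_alt (lattice_dimensions : List Int) (q : Int) : List Int :=
  let n : Int := (PySem.List.slice lattice_dimensions none (some 3)).foldl (fun acc d => acc * max 0 d) 1
  (PySem.List.pyRange 0 (4 * n) 1).map (fun _ => (0 : Int))

-- ===== PRECONDITION & SPEC =====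
-- Pre_ admits exactly the inputs on which A returns (A raises IndexError when the list is
-- too short for the indices its non-empty ranges force it to read).
def Pre_assign_atom_charges (lattice_dimensions : List Int) (q : Int) : Prop :=
  1 ≤ lattice_dimensions.length ∧
    (0 < lattice_dimensions.getD 0 0 →
      2 ≤ lattice_dimensions.length ∧
        (0 < lattice_dimensions.getD 1 0 → 3 ≤ lattice_dimensions.length))
instance (lattice_dimensions : List Int) (q : Int) : Decidable (Pre_assign_atom_charges lattice_dimensions q) := by unfold Pre_assign_atom_charges; infer_instance

def pvWitness_assign_atom_charges : List Int × Int := ([2, 1, 3], 0)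

def Spec_assign_atom_charges (lattice_dimensions : List Int) (q : Int) (out : List Int) : Prop := out = assign_atom_charges_alt lattice_dimensions q
instance (lattice_dimensions : List Int) (q : Int) (out : List Int) : Decidable (Spec_assign_atom_charges lattice_dimensions q out) := by unfold Spec_assign_atom_charges; infer_instance

-- ===== CLAIM (what is proved, stated in full; the proofs are below) =====
def Claim_equal_assign_atom_charges : Prop := ∀ (lattice_dimensions : List Int) (q : Int), Dom_assign_atom_charges lattice_dimensions q → Pre_assign_atom_charges lattice_dimensions q → Spec_assign_atom_charges lattice_dimensions q (assign_atom_charges lattice_dimensions q)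
-- ===== LEMMAS AND PROOFS =====

-- a flatMap of a constant replicate-block is one big replicate
lemma flatMap_const_replicate {β : Type} (xs : List β) (m : Nat) :
    xs.flatMap (fun _ => List.replicate m (0 : Int)) = List.replicate (xs.length * m) 0 := by
  induction xs with
  | nil => simp
  | cons a t ih =>
      simp only [List.flatMap_cons, ih, List.length_cons]
      rw [← List.replicate_add]
      congr 1
      ring

lemma A_closed (l : List Int) (q : Int) :
    assign_atom_charges l q =
      List.replicate ((PySem.List.pyGetD l 0 0).toNat *
        ((PySem.List.pyGetD l 1 0).toNat * ((PySem.List.pyGetD l 2 0).toNat * 4))) 0 := by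
  have hcell : ([0, 0, 0, 0] : List Int) = List.replicate 4 0 := rfl
  simp only [assign_atom_charges, hcell, PySem.List.foldl_append_eq_flatMap,
    flatMap_const_replicate, PySem.List.length_pyRange_one, List.nil_append, Int.sub_zero]

lemma B_closed (l : List Int) (q : Int) :
    assign_atom_charges_alt l q =
      List.replicate ((4 * (PySem.List.slice l none (some 3)).foldl (fun acc d => acc * max 0 d) 1).toNat) 0 := by
  simp only [assign_atom_charges_alt, List.map_const', PySem.List.length_pyRange_one, Int.sub_zero]

lemma take3 (l : List Int) : PySem.List.slice l none (some 3) = l.take 3 := by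
  simpa using PySem.List.slice_to l (b := 3) (by norm_num)

lemma g0 (a : Int) (l : List Int) (d : Int) : PySem.List.pyGetD (a::l) 0 d = a := by simp [pysem]
lemma g1 (a b : Int) (l : List Int) (d : Int) : PySem.List.pyGetD (a::b::l) 1 d = b := by simp [pysem]
lemma g2 (a b c : Int) (l : List Int) (d : Int) : PySem.List.pyGetD (a::b::c::l) 2 d = c := by simp [pysem]
lemma g1d (a : Int) (d : Int) : PySem.List.pyGetD [a] 1 d = d := by simp [pysem]
lemma g2d1 (a : Int) (d : Int) : PySem.List.pyGetD [a] 2 d = d := by simp [pysem]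
lemma g2d2 (a b : Int) (d : Int) : PySem.List.pyGetD [a,b] 2 d = d := by simp [pysem]

-- ===== VERDICT (by name: the statement is the Claim_ definition above) =====
theorem assign_atom_charges_spec : Claim_equal_assign_atom_charges := by
  intro l q _hD hPre
  unfold Spec_assign_atom_charges
  rw [A_closed, B_closed, take3]
  rcases l with _ | ⟨a, _ | ⟨b, _ | ⟨c, t⟩⟩⟩
  · exact absurd hPre.1 (by simp)
  · -- length 1: Pre forces a ≤ 0
    have ha : ¬ 0 < a := fun h => by
      have := (hPre.2 (by simpa using h)).1
      simp at this
    rw [g0, g1d, g2d1]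
    have hm : max 0 a = 0 := by omega
    simp [hm]
  · -- length 2: Pre forces a ≤ 0 or b ≤ 0
    have hab : ¬ (0 < a ∧ 0 < b) := fun ⟨ha, hb⟩ => by
      have := (hPre.2 (by simpa using ha)).2 (by simpa using hb)
      simp at this
    have h : (1 * max 0 a) * max 0 b = 0 := by
      rcases not_and_or.mp hab with h | h
      · have hm : max 0 a = 0 := by omega
        rw [hm]; ring
      · have hm : max 0 b = 0 := by omega
        rw [hm]; ring
    rw [g0, g1, g2d2]
    simp only [List.take_succ_cons, List.foldl_cons, List.foldl_nil, h]
    simp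
  · -- length ≥ 3
    have hma : max 0 a = ((a.toNat : Int)) := by omega
    have hmb : max 0 b = ((b.toNat : Int)) := by omega
    have hmc : max 0 c = ((c.toNat : Int)) := by omega
    have hprod : (1 * max 0 a) * max 0 b * max 0 c = ((a.toNat * b.toNat * c.toNat : Nat) : Int) := by
      rw [hma, hmb, hmc]; push_cast; ring
    rw [g0, g1, g2]
    simp only [List.take_succ_cons, List.take_zero, List.foldl_cons, List.foldl_nil, hprod]
    have h4 : (4 : Int) * ((a.toNat * b.toNat * c.toNat : Nat) : Int) = ((4 * (a.toNat * b.toNat * c.toNat) : Nat) : Int) := by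
      push_cast
      ring
    congr 1
    rw [h4, Int.toNat_natCast]
    ring
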